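-- pv_equiv track=rewrite | github.com/saArbabi/DriverActionEstimators | factory/data_generator.py | seq_sequence
-- ===== SOURCE A (Python) =====
-- from collections import deque
--
-- def seq_sequence(training_states, h_len):
--     states_h, states_c, actions = training_states
--     scaled_s_h = []
--     xs_c = []
--     ys_c = []
--     episode_steps_n = len(states_h)
--     scaled_s_h_seq = deque(maxlen=h_len)
--
--     for i in range(episode_steps_n):
--         scaled_s_h_seq.append(states_h[i])
--         if len(scaled_s_h_seq) == h_len:
--             scaled_s_h.append(list(scaled_s_h_seq))
--             xs_c.append(states_c[i])
--             ys_c.append(actions[i])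
--
--     return scaled_s_h, xs_c, ys_c
-- ===== SOURCE B (Python) =====
-- def seq_sequence(training_states, h_len):
--     # Rebuild each window by slicing the original list instead of rolling a deque.
--     states_h, states_c, actions = training_states
--     n = len(states_h)
--     start = max(h_len - 1, 0)
--     scaled_s_h = [states_h[i - h_len + 1:i + 1] for i in range(start, n)]
--     return scaled_s_h, states_c[start:n], actions[start:n]
-- ===== Notes on version B (the rewrite author's own statement) =====
-- stated objective: simpler
-- what changed: Replaces the rolling deque buffer and per-step length check with direct slicing: each window is states_h[i-h_len+1:i+1] for i in range(max(h_len-1,0), n), and the aligned labels are plain slices states_c[start:n], actions[start:n].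
import Mathlib
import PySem

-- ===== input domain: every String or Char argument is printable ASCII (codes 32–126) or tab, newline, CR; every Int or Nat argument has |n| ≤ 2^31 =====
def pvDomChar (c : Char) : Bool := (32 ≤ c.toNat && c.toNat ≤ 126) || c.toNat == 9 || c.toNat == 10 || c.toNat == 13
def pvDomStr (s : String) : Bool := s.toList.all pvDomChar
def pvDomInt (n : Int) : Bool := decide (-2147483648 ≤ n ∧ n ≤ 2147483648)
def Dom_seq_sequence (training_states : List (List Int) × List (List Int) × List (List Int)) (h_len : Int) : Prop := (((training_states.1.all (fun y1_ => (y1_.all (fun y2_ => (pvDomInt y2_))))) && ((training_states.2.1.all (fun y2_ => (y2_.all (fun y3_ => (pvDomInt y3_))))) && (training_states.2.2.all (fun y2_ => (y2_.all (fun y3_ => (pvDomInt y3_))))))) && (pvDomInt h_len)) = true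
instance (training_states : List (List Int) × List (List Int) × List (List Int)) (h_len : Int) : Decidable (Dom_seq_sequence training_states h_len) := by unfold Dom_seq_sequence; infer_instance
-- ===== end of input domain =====

-- B drops the rolling deque buffer: each window is a direct slice states_h[i-h_len+1:i+1]
-- and the aligned labels are plain slices of states_c/actions (objective: simpler).

-- ===== PORT A =====
-- deque(maxlen=m).append: keep the last m elements (m ≥ 0 under Pre_)
def pvDequeAppend (m : Int) (seq : List (List Int)) (x : List Int) : List (List Int) :=
  let s := seq ++ [x]
  if (s.length : Int) > m then s.drop (s.length - m.toNat) else s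

-- one iteration of A's for-loop; state = (scaled_s_h_seq, scaled_s_h, xs_c, ys_c)
def pvStepA (states_h states_c actions : List (List Int)) (h_len : Int)
    (st : List (List Int) × List (List (List Int)) × List (List Int) × List (List Int))
    (i : Nat) :
    List (List Int) × List (List (List Int)) × List (List Int) × List (List Int) :=
  let seq := pvDequeAppend h_len st.1 (states_h.getD i [])
  if (seq.length : Int) = h_len then
    (seq, st.2.1 ++ [seq], st.2.2.1 ++ [states_c.getD i []], st.2.2.2 ++ [actions.getD i []])
  else
    (seq, st.2.1, st.2.2.1, st.2.2.2)

def seq_sequence (training_states : List (List Int) × List (List Int) × List (List Int)) (h_len : Int) : List (List (List Int)) × List (List Int) × List (List Int) :=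
  let states_h := training_states.1
  let states_c := training_states.2.1
  let actions := training_states.2.2
  let r := (List.range states_h.length).foldl (pvStepA states_h states_c actions h_len) ([], [], [], [])
  (r.2.1, r.2.2.1, r.2.2.2)

-- ===== PORT B =====
def seq_sequence_alt (training_states : List (List Int) × List (List Int) × List (List Int)) (h_len : Int) : List (List (List Int)) × List (List Int) × List (List Int) :=
  let states_h := training_states.1
  let states_c := training_states.2.1
  let actions := training_states.2.2
  let n : Int := states_h.length
  let start : Int := max (h_len - 1) 0
  ((PySem.List.pyRange start n 1).map
      (fun i => PySem.List.slice states_h (some (i - h_len + 1)) (some (i + 1))),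
   PySem.List.slice states_c (some start) (some n),
   PySem.List.slice actions (some start) (some n))

-- ===== PRECONDITION & SPEC =====
-- Pre_ excludes exactly where Python A raises: h_len < 0 (ValueError from deque(maxlen)),
-- and short states_c/actions when at least one window is emitted (IndexError at states_c[i]/actions[i]).
def Pre_seq_sequence (training_states : List (List Int) × List (List Int) × List (List Int)) (h_len : Int) : Prop :=
  0 ≤ h_len ∧
  (max (h_len - 1) 0 < (training_states.1.length : Int) →
    (training_states.1.length : Int) ≤ training_states.2.1.length ∧
    (training_states.1.length : Int) ≤ training_states.2.2.length)
instance (training_states : List (List Int) × List (List Int) × List (List Int)) (h_len : Int) : Decidable (Pre_seq_sequence training_states h_len) := by unfold Pre_seq_sequence; infer_instance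

def pvWitness_seq_sequence : (List (List Int) × List (List Int) × List (List Int)) × Int :=
  (([[1], [2], [3]], [[4], [5], [6]], [[7], [8], [9]]), 2)

def Spec_seq_sequence (training_states : List (List Int) × List (List Int) × List (List Int)) (h_len : Int) (out : List (List (List Int)) × List (List Int) × List (List Int)) : Prop := out = seq_sequence_alt training_states h_len
instance (training_states : List (List Int) × List (List Int) × List (List Int)) (h_len : Int) (out : List (List (List Int)) × List (List Int) × List (List Int)) : Decidable (Spec_seq_sequence training_states h_len out) := by unfold Spec_seq_sequence; infer_instance

-- ===== CLAIM (what is proved, stated in full; the proofs are below) =====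
def Claim_equal_seq_sequence : Prop := ∀ (training_states : List (List Int) × List (List Int) × List (List Int)) (h_len : Int), Dom_seq_sequence training_states h_len → Pre_seq_sequence training_states h_len → Spec_seq_sequence training_states h_len (seq_sequence training_states h_len)

-- ===== LEMMAS AND PROOFS =====

-- the deque's content after k appends: last h of the first k elements
def pvDeq (sh : List (List Int)) (h k : Nat) : List (List Int) :=
  (sh.take k).drop (k - h)

lemma pvFoldA (sh sc ac : List (List Int)) (h : Nat) (k : Nat) (hk : k ≤ sh.length) :
    (List.range k).foldl (pvStepA sh sc ac (h : Int)) ([], [], [], []) =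
      (pvDeq sh h k,
       ((List.range k).filter (fun i => h ≤ i + 1)).map (fun i => pvDeq sh h (i + 1)),
       ((List.range k).filter (fun i => h ≤ i + 1)).map (fun i => sc.getD i []),
       ((List.range k).filter (fun i => h ≤ i + 1)).map (fun i => ac.getD i [])) := by
  induction k with
  | zero => simp [pvDeq]
  | succ k ih =>
    have hk' : k ≤ sh.length := Nat.le_of_succ_le hk
    have hklt : k < sh.length := hk
    rw [List.range_succ, List.foldl_append, ih hk', List.filter_append, List.map_append,
        List.map_append, List.map_append]
    have htake : sh.take (k + 1) = sh.take k ++ [sh.getD k []] := by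
      rw [List.getD_eq_getElem sh [] hklt, ← List.take_concat_get']
    have hlen_take : (sh.take k).length = k := by simp [hk']
    have hpush : pvDequeAppend (h : Int) (pvDeq sh h k) (sh.getD k []) = pvDeq sh h (k + 1) := by
      unfold pvDequeAppend pvDeq
      have hs : (sh.take k).drop (k - h) ++ [sh.getD k []] = (sh.take (k + 1)).drop (k - h) := by
        rw [htake, List.drop_append_of_le_length (by omega)]
      simp only [hs]
      have hlen1 : (sh.take (k + 1)).length = k + 1 := by simp [hk]
      have hlend : ((sh.take (k + 1)).drop (k - h)).length = k + 1 - (k - h) := by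
        simp [hlen1]
      by_cases hh : h ≤ k
      · have : ((((sh.take (k + 1)).drop (k - h)).length : Int) > (h : Int)) := by
          rw [hlend]; omega
        rw [if_pos this, List.drop_drop]
        congr 1
        rw [hlend]
        omega
      · rw [if_neg (by rw [hlend]; omega)]
        congr 1
        omega
    have hdlen : (pvDeq sh h (k + 1)).length = min (k + 1) h := by
      unfold pvDeq
      have : (sh.take (k + 1)).length = k + 1 := by simp [hk]
      simp [this]
      omega
    simp only [List.foldl_cons, List.foldl_nil, pvStepA, hpush]
    by_cases hcond : h ≤ k + 1
    · have : ((pvDeq sh h (k + 1)).length : Int) = (h : Int) := by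
        rw [hdlen]; push_cast; omega
      rw [if_pos this]
      simp [hcond]
    · have : ¬ ((pvDeq sh h (k + 1)).length : Int) = (h : Int) := by
        rw [hdlen]; push_cast; omega
      rw [if_neg this]
      simp [hcond]

lemma pvFilterRange (h n : Nat) :
    (List.range n).filter (fun i => h ≤ i + 1) =
      (List.range (n - (h - 1))).map (fun j => (h - 1) + j) := by
  induction n with
  | zero => simp
  | succ n ih =>
    rw [List.range_succ, List.filter_append, ih]
    by_cases hh : h ≤ n + 1
    · have : n + 1 - (h - 1) = (n - (h - 1)) + 1 := by omega
      rw [this, List.range_succ, List.map_append]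
      simp only [List.filter_cons]
      have : (h - 1) + (n - (h - 1)) = n := by omega
      simp [hh, this]
    · simp only [List.filter_cons]
      have h1 : n + 1 - (h - 1) = 0 := by omega
      have h2 : n - (h - 1) = 0 := by omega
      simp [hh, h1, h2]

lemma pvMapGetD (L : List (List Int)) (a m : Nat) (hm : m = 0 ∨ a + m ≤ L.length) :
    (List.range m).map (fun j => L.getD (a + j) []) = (L.drop a).take m := by
  apply List.ext_getElem
  · simp; omega
  · intro j h1 h2
    have hj : j < m := by simpa using h1
    have hjL : j + a < L.length := by omega
    simp [Nat.add_comm a j, List.getD, List.getElem?_eq_getElem hjL]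

theorem seq_sequence_spec : Claim_equal_seq_sequence := by
  intro ts h_len _hdom hpre
  obtain ⟨sh, sc, ac⟩ := ts
  obtain ⟨hpos, hlens⟩ := hpre
  obtain ⟨h, rfl⟩ : ∃ h : Nat, h_len = (h : Int) := ⟨h_len.toNat, (Int.toNat_of_nonneg hpos).symm⟩
  unfold Spec_seq_sequence seq_sequence seq_sequence_alt
  simp only
  rw [pvFoldA sh sc ac h sh.length le_rfl]
  have hstart : max ((h : Int) - 1) 0 = ((h - 1 : Nat) : Int) := by omega
  set n := sh.length with hn
  have hrange : PySem.List.pyRange ((h - 1 : Nat) : Int) (n : Int) 1 =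
      (List.range (n - (h - 1))).map (fun k : Nat => (((h - 1) + k : Nat) : Int)) := by
    rw [PySem.List.pyRange_one]
    have : (((n : Int) - ((h - 1 : Nat) : Int)).toNat) = n - (h - 1) := by omega
    rw [this]
    apply List.map_congr_left
    intro k _
    push_cast; ring
  refine Prod.ext ?_ (Prod.ext ?_ ?_)
  · -- windows
    simp only [hstart, hrange, List.map_map, pvFilterRange]
    apply List.map_congr_left
    intro j hj
    have hjlt : j < n - (h - 1) := by simpa using hj
    set i : Nat := (h - 1) + j with hi
    have h1 : ((((h - 1) + j : Nat) : Int) - (h : Int) + 1) = ((i + 1 - h : Nat) : Int) := by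
      push_cast; omega
    have h2 : ((((h - 1) + j : Nat) : Int) + 1) = ((i + 1 : Nat) : Int) := by push_cast; omega
    simp only [Function.comp, h1, h2, PySem.List.slice_natCast]
    unfold pvDeq
    rw [List.drop_take]
  · -- xs_c
    simp only [pvFilterRange, List.map_map, Function.comp_def]
    rw [pvMapGetD sc (h - 1) (n - (h - 1)) ?_, hstart, PySem.List.slice_natCast]
    by_cases hlt : h - 1 < n
    · right
      have := (hlens (by rw [hstart]; omega)).1
      simp only at this
      omega
    · left
      omega
  · -- ys_c
    simp only [pvFilterRange, List.map_map, Function.comp_def]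
    rw [pvMapGetD ac (h - 1) (n - (h - 1)) ?_, hstart, PySem.List.slice_natCast]
    by_cases hlt : h - 1 < n
    · right
      have := (hlens (by rw [hstart]; omega)).2
      simp only at this
      omega
    · left
      omega
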